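-- pv_equiv track=rewrite | github.com/kirill3005/wb_parser | vseros-toolkit-main/common/features/time_agg.py | _feature_columns
-- ===== SOURCE A (Python) =====
-- from typing import Any, Dict, List, Optional, Sequence, Tuple
--
-- def _feature_columns(
--     num_cols: List[str],
--     lags: Sequence[int],
--     rollings_count: Sequence[int],
--     rollings_time: Sequence[str],
--     ewm_spans: Sequence[int],
--     agg_funcs: Sequence[str],
--     prefix: str,
-- ) -> List[str]:
--     cols: List[str] = []
--     for col in num_cols:
--         for k in lags:
--             cols.append(f"{prefix}__{col}__lag{k}")
--         for w in rollings_count: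
--             for agg in agg_funcs:
--                 cols.append(f"{prefix}__{col}__rollN{w}__{agg}")
--         for w in rollings_time:
--             for agg in agg_funcs:
--                 cols.append(f"{prefix}__{col}__rollT{w}__{agg}")
--         for span in ewm_spans:
--             cols.append(f"{prefix}__{col}__ewm{span}__mean")
--             if "std" in agg_funcs:
--                 cols.append(f"{prefix}__{col}__ewm{span}__std")
--     return cols
-- ===== SOURCE B (Python) =====
-- from typing import List, Sequence
--
-- def _feature_columns(
--     num_cols: List[str],
--     lags: Sequence[int],
--     rollings_count: Sequence[int],
--     rollings_time: Sequence[str],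
--     ewm_spans: Sequence[int],
--     agg_funcs: Sequence[str],
--     prefix: str,
-- ) -> List[str]:
--     # Build the column-independent suffix table once, then combine with columns.
--     suffixes: List[str] = [f"lag{k}" for k in lags]
--     suffixes += [f"rollN{w}__{agg}" for w in rollings_count for agg in agg_funcs]
--     suffixes += [f"rollT{w}__{agg}" for w in rollings_time for agg in agg_funcs]
--     has_std = "std" in agg_funcs
--     for span in ewm_spans:
--         suffixes.append(f"ewm{span}__mean")
--         if has_std:
--             suffixes.append(f"ewm{span}__std")
--     return [f"{prefix}__{col}__{suf}" for col in num_cols for suf in suffixes]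
-- ===== Notes on version B (the rewrite author's own statement) =====
-- stated objective: alternative
-- what changed: B hoists the column-invariant suffix fragments into a single suffix table built once (comprehensions plus one ewm loop) and then produces the result with one combining pass over columns x suffixes, instead of A's fully inlined nested loops per column.
import Mathlib
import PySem

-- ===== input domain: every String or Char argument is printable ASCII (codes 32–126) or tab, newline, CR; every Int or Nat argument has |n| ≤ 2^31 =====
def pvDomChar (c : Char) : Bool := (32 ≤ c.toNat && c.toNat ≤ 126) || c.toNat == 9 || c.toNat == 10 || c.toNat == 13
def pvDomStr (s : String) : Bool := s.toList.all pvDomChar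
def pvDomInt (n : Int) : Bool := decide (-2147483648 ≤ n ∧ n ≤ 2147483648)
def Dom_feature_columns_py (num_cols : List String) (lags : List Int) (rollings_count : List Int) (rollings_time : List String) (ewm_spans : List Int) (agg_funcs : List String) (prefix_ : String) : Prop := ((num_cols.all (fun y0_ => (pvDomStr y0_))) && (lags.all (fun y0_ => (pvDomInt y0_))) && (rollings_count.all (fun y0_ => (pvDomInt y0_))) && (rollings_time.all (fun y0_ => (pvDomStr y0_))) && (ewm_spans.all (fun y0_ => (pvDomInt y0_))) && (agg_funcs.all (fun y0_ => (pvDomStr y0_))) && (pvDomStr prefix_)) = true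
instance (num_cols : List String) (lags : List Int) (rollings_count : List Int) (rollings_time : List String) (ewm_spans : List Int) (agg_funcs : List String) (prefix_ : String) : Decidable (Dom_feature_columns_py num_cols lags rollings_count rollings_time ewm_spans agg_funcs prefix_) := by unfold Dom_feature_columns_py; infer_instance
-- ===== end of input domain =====

-- B builds the column-independent suffix table once and combines it with the columns in a
-- single pass, instead of A's fully inlined nested loops per column; same output, same cost.

-- ===== PORT A =====
def feature_columns_py (num_cols : List String) (lags : List Int) (rollings_count : List Int) (rollings_time : List String) (ewm_spans : List Int) (agg_funcs : List String) (prefix_ : String) : List String :=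
  num_cols.foldl (fun cols col =>
    let cols := lags.foldl (fun cs k =>
      cs ++ [prefix_ ++ "__" ++ col ++ "__lag" ++ PySem.Int.toStr k]) cols
    let cols := rollings_count.foldl (fun cs w =>
      agg_funcs.foldl (fun cs2 agg =>
        cs2 ++ [prefix_ ++ "__" ++ col ++ "__rollN" ++ PySem.Int.toStr w ++ "__" ++ agg]) cs) cols
    let cols := rollings_time.foldl (fun cs w =>
      agg_funcs.foldl (fun cs2 agg =>
        cs2 ++ [prefix_ ++ "__" ++ col ++ "__rollT" ++ w ++ "__" ++ agg]) cs) cols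
    ewm_spans.foldl (fun cs span =>
      let cs := cs ++ [prefix_ ++ "__" ++ col ++ "__ewm" ++ PySem.Int.toStr span ++ "__mean"]
      if agg_funcs.contains "std" then
        cs ++ [prefix_ ++ "__" ++ col ++ "__ewm" ++ PySem.Int.toStr span ++ "__std"]
      else cs) cols) []

-- ===== PORT B =====
def feature_columns_py_alt (num_cols : List String) (lags : List Int) (rollings_count : List Int) (rollings_time : List String) (ewm_spans : List Int) (agg_funcs : List String) (prefix_ : String) : List String :=
  let suffixes : List String :=
    lags.map (fun k => "lag" ++ PySem.Int.toStr k)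
    ++ rollings_count.flatMap (fun w => agg_funcs.map (fun agg => "rollN" ++ PySem.Int.toStr w ++ "__" ++ agg))
    ++ rollings_time.flatMap (fun w => agg_funcs.map (fun agg => "rollT" ++ w ++ "__" ++ agg))
    ++ (let has_std := agg_funcs.contains "std"
        ewm_spans.flatMap (fun span =>
          ["ewm" ++ PySem.Int.toStr span ++ "__mean"]
          ++ (if has_std then ["ewm" ++ PySem.Int.toStr span ++ "__std"] else [])))
  num_cols.flatMap (fun col => suffixes.map (fun suf => prefix_ ++ "__" ++ col ++ "__" ++ suf))

-- ===== PRECONDITION & SPEC =====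
def Spec_feature_columns_py (num_cols : List String) (lags : List Int) (rollings_count : List Int) (rollings_time : List String) (ewm_spans : List Int) (agg_funcs : List String) (prefix_ : String) (out : List String) : Prop := out = feature_columns_py_alt num_cols lags rollings_count rollings_time ewm_spans agg_funcs prefix_
instance (num_cols : List String) (lags : List Int) (rollings_count : List Int) (rollings_time : List String) (ewm_spans : List Int) (agg_funcs : List String) (prefix_ : String) (out : List String) : Decidable (Spec_feature_columns_py num_cols lags rollings_count rollings_time ewm_spans agg_funcs prefix_ out) := by unfold Spec_feature_columns_py; infer_instance

-- ===== CLAIM (what is proved, stated in full; the proofs are below) =====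
def Claim_equal_feature_columns_py : Prop := ∀ (num_cols : List String) (lags : List Int) (rollings_count : List Int) (rollings_time : List String) (ewm_spans : List Int) (agg_funcs : List String) (prefix_ : String), Dom_feature_columns_py num_cols lags rollings_count rollings_time ewm_spans agg_funcs prefix_ → Spec_feature_columns_py num_cols lags rollings_count rollings_time ewm_spans agg_funcs prefix_ (feature_columns_py num_cols lags rollings_count rollings_time ewm_spans agg_funcs prefix_)

-- ===== LEMMAS AND PROOFS =====

-- A's ewm loop: append the mean name, conditionally the std name.
theorem ewm_fold (c : Bool) (m s : Int → String) :
    ∀ (l : List Int) (init : List String),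
      l.foldl (fun cs span =>
        let cs := cs ++ [m span]
        if c then cs ++ [s span] else cs) init
      = init ++ l.flatMap (fun span => [m span] ++ (if c then [s span] else [])) := by
  intro l
  induction l with
  | nil => simp
  | cons x t ih =>
    intro init
    rw [List.foldl_cons, ih]
    cases c <;> simp [List.flatMap_cons, List.append_assoc]

-- A's nested rolling loops: for each w, append one name per agg.
theorem roll_fold {α : Type} (aggs : List String) (g : α → String → String) :
    ∀ (l : List α) (init : List String),
      l.foldl (fun cs w => aggs.foldl (fun cs2 agg => cs2 ++ [g w agg]) cs) init
      = init ++ l.flatMap (fun w => aggs.map (g w)) := by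
  intro l
  induction l with
  | nil => simp
  | cons x t ih =>
    intro init
    rw [List.foldl_cons, PySem.List.foldl_append_singleton_eq_map, ih]
    simp [List.flatMap_cons, List.append_assoc]

-- a ++ t = b ++ (c ++ t) when a = b ++ c (used to split A's fused literals, e.g. "__lag").
theorem str_split (a b c : String) (h : a = b ++ c) (t : String) :
    a ++ t = b ++ (c ++ t) := by rw [h, String.append_assoc]

theorem feature_columns_py_eq (num_cols : List String) (lags : List Int) (rollings_count : List Int) (rollings_time : List String) (ewm_spans : List Int) (agg_funcs : List String) (prefix_ : String) :
    feature_columns_py num_cols lags rollings_count rollings_time ewm_spans agg_funcs prefix_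
    = feature_columns_py_alt num_cols lags rollings_count rollings_time ewm_spans agg_funcs prefix_ := by
  unfold feature_columns_py feature_columns_py_alt
  simp only []
  suffices h : ∀ (ncs : List String) (init : List String),
      ncs.foldl (fun cols col =>
        let cols := lags.foldl (fun cs k =>
          cs ++ [prefix_ ++ "__" ++ col ++ "__lag" ++ PySem.Int.toStr k]) cols
        let cols := rollings_count.foldl (fun cs w =>
          agg_funcs.foldl (fun cs2 agg =>
            cs2 ++ [prefix_ ++ "__" ++ col ++ "__rollN" ++ PySem.Int.toStr w ++ "__" ++ agg]) cs) cols
        let cols := rollings_time.foldl (fun cs w =>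
          agg_funcs.foldl (fun cs2 agg =>
            cs2 ++ [prefix_ ++ "__" ++ col ++ "__rollT" ++ w ++ "__" ++ agg]) cs) cols
        ewm_spans.foldl (fun cs span =>
          let cs := cs ++ [prefix_ ++ "__" ++ col ++ "__ewm" ++ PySem.Int.toStr span ++ "__mean"]
          if agg_funcs.contains "std" then
            cs ++ [prefix_ ++ "__" ++ col ++ "__ewm" ++ PySem.Int.toStr span ++ "__std"]
          else cs) cols) init
      = init ++ ncs.flatMap (fun col =>
          (lags.map (fun k => "lag" ++ PySem.Int.toStr k)
           ++ rollings_count.flatMap (fun w => agg_funcs.map (fun agg => "rollN" ++ PySem.Int.toStr w ++ "__" ++ agg))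
           ++ rollings_time.flatMap (fun w => agg_funcs.map (fun agg => "rollT" ++ w ++ "__" ++ agg))
           ++ ewm_spans.flatMap (fun span =>
                ["ewm" ++ PySem.Int.toStr span ++ "__mean"]
                ++ (if agg_funcs.contains "std" then ["ewm" ++ PySem.Int.toStr span ++ "__std"] else []))).map
            (fun suf => prefix_ ++ "__" ++ col ++ "__" ++ suf)) by
    rw [h num_cols []]; simp
  intro ncs
  induction ncs with
  | nil => simp
  | cons col rest ih =>
    intro init
    simp only [List.foldl_cons, List.flatMap_cons]
    rw [ih]
    rw [PySem.List.foldl_append_singleton_eq_map, roll_fold, roll_fold, ewm_fold]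
    simp only [List.map_append, List.map_map, List.map_flatMap, List.append_assoc]
    congr 1
    congr 1
    · exact List.map_congr_left fun k _ => by
        simp [String.append_assoc, str_split "__lag" "__" "lag" rfl]
    congr 1
    · exact List.flatMap_congr fun w _ => List.map_congr_left fun agg _ => by
        simp [Function.comp, String.append_assoc, str_split "__rollN" "__" "rollN" rfl]
    congr 1
    · exact List.flatMap_congr fun w _ => List.map_congr_left fun agg _ => by
        simp [Function.comp, String.append_assoc, str_split "__rollT" "__" "rollT" rfl]
    congr 1
    exact List.flatMap_congr fun span _ => by
      cases h : agg_funcs.contains "std" <;>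
        simp [String.append_assoc, str_split "__ewm" "__" "ewm" rfl]

-- ===== VERDICT (by name: the statement is the Claim_ definition above) =====
theorem feature_columns_py_spec : Claim_equal_feature_columns_py := by
  intro num_cols lags rollings_count rollings_time ewm_spans agg_funcs prefix_ _
  exact feature_columns_py_eq num_cols lags rollings_count rollings_time ewm_spans agg_funcs prefix_
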